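-- pv_equiv track=rewrite | github.com/Vap-San/Python | DZ10/processor.py | check_4_win
-- ===== SOURCE A (Python) =====
-- def check_4_win(fld: list):
--     win_coord = ((0, 1, 2),
--                 (1,2,3),
--                 (4,5,6),
--                 (5,6,7),
--                 (8,9,10),
--                 (9,10,11),
--                 (12,13,14),
--                 (13,14,15),
--                 (0,4,8),
--                 (4,8,12),
--                 (1,5,9),
--                 (5,9,13),
--                 (2,6,10),
--                 (6,10,14),
--                 (3,7,11),
--                 (7,11,15),
--                 (4,9,14),
--                 (0,5,10),
--                 (5,10,15),
--                 (1,6,11),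
--                 (2,5,8),
--                 (3,6,9),
--                 (6,9,12),
--                 (7,10,13))
--  # сравниваем текущее поле с выигрышными комбинациями
--     for winrec in win_coord:
--         if (fld[winrec[0]] == fld[winrec[1]] == fld[winrec[2]]) and fld[winrec[0]] != ' ':
--             return True
--     return False
-- ===== SOURCE B (Python) =====
-- def check_4_win(fld: list):
--     # view the board as a 4x4 grid and stream its scan lines (rows, columns,
--     # length>=3 diagonals); slide a 3-wide window over each line looking for
--     # three equal non-blank cells
--     def cell(r, c):
--         return fld[4 * r + c]
--
--     def scan_lines():
--         for r in range(4):
--             yield [cell(r, c) for c in range(4)]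
--         for c in range(4):
--             yield [cell(r, c) for r in range(4)]
--         yield [cell(i, i) for i in range(4)]
--         yield [cell(i, 3 - i) for i in range(4)]
--         yield [cell(i + 1, i) for i in range(3)]
--         yield [cell(i, i + 1) for i in range(3)]
--         yield [cell(i, 2 - i) for i in range(3)]
--         yield [cell(i + 1, 3 - i) for i in range(3)]
--
--     for s in scan_lines():
--         for a, b, c in zip(s, s[1:], s[2:]):
--             if a == b == c != ' ':
--                 return True
--     return False
-- ===== Notes on version B (the rewrite author's own statement) =====
-- stated objective: alternative
-- what changed: Replaces the hardcoded 24-triple index table and its single scan by a grid decomposition: stream the ten scan lines of the 4x4 board (4 rows, 4 columns, the length>=3 diagonals) and slide a 3-wide window over each looking for three equal non-blank cells.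
-- outside the precondition, e.g. on check_4_win(['a', 'a', 'a']): A returns True, B raises IndexError
import Mathlib
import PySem

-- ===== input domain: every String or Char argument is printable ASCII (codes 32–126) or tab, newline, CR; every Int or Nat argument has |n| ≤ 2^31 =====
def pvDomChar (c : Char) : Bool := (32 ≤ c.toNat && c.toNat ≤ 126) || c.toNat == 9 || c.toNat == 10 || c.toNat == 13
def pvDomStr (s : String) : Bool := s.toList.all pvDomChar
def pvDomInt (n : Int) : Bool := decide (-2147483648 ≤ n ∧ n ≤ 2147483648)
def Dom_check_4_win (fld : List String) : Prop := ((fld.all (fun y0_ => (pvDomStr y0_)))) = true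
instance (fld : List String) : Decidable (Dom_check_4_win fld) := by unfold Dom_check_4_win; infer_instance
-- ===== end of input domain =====

-- B drops A's hardcoded 24-triple win table: it streams the ten scan lines of the
-- 4x4 grid and slides a 3-wide window over each (objective: alternative, same cost).


-- ===== PORT A =====
-- fld[i]; on Pre_ every index A's scan evaluates is in range, the getD "" default is never reached
def pvCellA (fld : List String) (i : Int) : String :=
  (PySem.List.pyGet? fld i).getD ""

def pvWinCoord : List (Int × Int × Int) :=
  [(0, 1, 2), (1, 2, 3), (4, 5, 6), (5, 6, 7), (8, 9, 10), (9, 10, 11),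
   (12, 13, 14), (13, 14, 15), (0, 4, 8), (4, 8, 12), (1, 5, 9), (5, 9, 13),
   (2, 6, 10), (6, 10, 14), (3, 7, 11), (7, 11, 15), (4, 9, 14), (0, 5, 10),
   (5, 10, 15), (1, 6, 11), (2, 5, 8), (3, 6, 9), (6, 9, 12), (7, 10, 13)]

-- the for-loop with early `return True` and final `return False` is `.any`
def check_4_win (fld : List String) : Bool :=
  pvWinCoord.any (fun w =>
    (pvCellA fld w.1 == pvCellA fld w.2.1 && pvCellA fld w.2.1 == pvCellA fld w.2.2)
      && pvCellA fld w.1 != " ")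

-- ===== PORT B =====
-- cell(r, c) = fld[4*r+c]; on Pre_ every cell B's scan evaluates is in range
def pvCellB (fld : List String) (r c : Int) : String :=
  (PySem.List.pyGet? fld (4 * r + c)).getD ""

-- the scan_lines generator, as the list it yields: rows, columns, the two
-- length-4 diagonals, the four length-3 diagonals
def pvSeqs (fld : List String) : List (List String) :=
  (PySem.List.pyRange 0 4 1).map (fun r =>
      (PySem.List.pyRange 0 4 1).map (fun c => pvCellB fld r c))
    ++ (PySem.List.pyRange 0 4 1).map (fun c =>
        (PySem.List.pyRange 0 4 1).map (fun r => pvCellB fld r c))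
    ++ [(PySem.List.pyRange 0 4 1).map (fun i => pvCellB fld i i),
        (PySem.List.pyRange 0 4 1).map (fun i => pvCellB fld i (3 - i)),
        (PySem.List.pyRange 0 3 1).map (fun i => pvCellB fld (i + 1) i),
        (PySem.List.pyRange 0 3 1).map (fun i => pvCellB fld i (i + 1)),
        (PySem.List.pyRange 0 3 1).map (fun i => pvCellB fld i (2 - i)),
        (PySem.List.pyRange 0 3 1).map (fun i => pvCellB fld (i + 1) (3 - i))]

-- the inner loop: zip(s, s[1:], s[2:]) with `a == b == c != ' '`
def pvHas3 (s : List String) : Bool :=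
  ((s.zip (s.drop 1)).zip (s.drop 2)).any (fun w =>
    (w.1.1 == w.1.2 && w.1.2 == w.2) && w.2 != " ")

def check_4_win_alt (fld : List String) : Bool := (pvSeqs fld).any pvHas3

-- ===== PRECONDITION & SPEC =====
def pvMax3 (w : Int × Int × Int) : Int := max w.1 (max w.2.1 w.2.2)
def pvPreCell (fld : List String) (i : Int) : String := fld.getD i.toNat ""
-- triple w makes Python A evaluate an out-of-range index (IndexError), short-circuits included
def pvBlocks (fld : List String) (w : Int × Int × Int) : Prop :=
  (fld.length : Int) ≤ w.1 ∨ (fld.length : Int) ≤ w.2.1 ∨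
    (pvPreCell fld w.1 = pvPreCell fld w.2.1 ∧ (fld.length : Int) ≤ w.2.2)
-- triple w is fully in range and wins
def pvWins (fld : List String) (w : Int × Int × Int) : Prop :=
  pvMax3 w < (fld.length : Int) ∧
    pvPreCell fld w.1 = pvPreCell fld w.2.1 ∧ pvPreCell fld w.2.1 = pvPreCell fld w.2.2 ∧
      pvPreCell fld w.1 ≠ " "
-- Python A's scan returns normally: every raising triple is preceded by a winning one
def pvRetA (fld : List String) : Prop :=
  ∀ m ∈ List.range pvWinCoord.length, pvBlocks fld (pvWinCoord.getD m (0, 0, 0)) →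
    ∃ n ∈ List.range m, pvWins fld (pvWinCoord.getD n (0, 0, 0))
-- Python B's scan returns normally on a short board: some fully in-range row
-- (rows are streamed first) contains a winning window
def pvRetB (fld : List String) : Prop :=
  ∃ r ∈ List.range 4, 4 * (r + 1) ≤ fld.length ∧
    ∃ c ∈ List.range 2, pvWins fld (4 * r + c, 4 * r + c + 1, 4 * r + c + 2)
-- Pre_ excludes boards shorter than 16 cells except those on which both Pythons still
-- return normally (an early win reached before any out-of-range access): on the other
-- short boards at least one of the two scans raises IndexError, an outcome that depends
-- only on the enumeration order of the lines, which no caller of a 4x4 board function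
-- would specify.
def Pre_check_4_win (fld : List String) : Prop :=
  16 ≤ fld.length ∨ (pvRetA fld ∧ pvRetB fld)
instance (fld : List String) : Decidable (Pre_check_4_win fld) := by
  unfold Pre_check_4_win pvRetA pvRetB pvBlocks pvWins; infer_instance

def pvWitness_check_4_win : List String :=
  ["X", "O", " ", " ", "O", "X", " ", " ", " ", " ", "X", " ", " ", " ", " ", "X"]

def Spec_check_4_win (fld : List String) (out : Bool) : Prop := out = check_4_win_alt fld
instance (fld : List String) (out : Bool) : Decidable (Spec_check_4_win fld out) := by
  unfold Spec_check_4_win; infer_instance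

-- ===== CLAIM (what is proved, stated in full; the proofs are below) =====
def Claim_equal_check_4_win : Prop :=
  ∀ (fld : List String), Dom_check_4_win fld → Pre_check_4_win fld →
    Spec_check_4_win fld (check_4_win fld)

-- ===== LEMMAS AND PROOFS =====
-- `a == b == c != ' '` tests the last cell, A's table test retests the first; equal when a = b = c
theorem pv_cond3 (x y z : String) :
    ((x == y && y == z) && z != " ") = ((x == y && y == z) && x != " ") := by
  by_cases hx : x = y
  · by_cases hy : y = z
    · subst hx; subst hy; rfl
    · have h : (y == z) = false := beq_eq_false_iff_ne.mpr hy
      simp [h]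
  · have h : (x == y) = false := beq_eq_false_iff_ne.mpr hx
    simp [h]

theorem ports_eq (fld : List String) : check_4_win fld = check_4_win_alt fld := by
  have h4 : PySem.List.pyRange 0 4 1 = [0, 1, 2, 3] := by decide
  have h3 : PySem.List.pyRange 0 3 1 = [0, 1, 2] := by decide
  have hc : ∀ r c : Int, pvCellB fld r c = pvCellA fld (4 * r + c) := fun _ _ => rfl
  have hseqs : pvSeqs fld =
      [[pvCellA fld 0, pvCellA fld 1, pvCellA fld 2, pvCellA fld 3],
       [pvCellA fld 4, pvCellA fld 5, pvCellA fld 6, pvCellA fld 7],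
       [pvCellA fld 8, pvCellA fld 9, pvCellA fld 10, pvCellA fld 11],
       [pvCellA fld 12, pvCellA fld 13, pvCellA fld 14, pvCellA fld 15],
       [pvCellA fld 0, pvCellA fld 4, pvCellA fld 8, pvCellA fld 12],
       [pvCellA fld 1, pvCellA fld 5, pvCellA fld 9, pvCellA fld 13],
       [pvCellA fld 2, pvCellA fld 6, pvCellA fld 10, pvCellA fld 14],
       [pvCellA fld 3, pvCellA fld 7, pvCellA fld 11, pvCellA fld 15],
       [pvCellA fld 0, pvCellA fld 5, pvCellA fld 10, pvCellA fld 15],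
       [pvCellA fld 3, pvCellA fld 6, pvCellA fld 9, pvCellA fld 12],
       [pvCellA fld 4, pvCellA fld 9, pvCellA fld 14],
       [pvCellA fld 1, pvCellA fld 6, pvCellA fld 11],
       [pvCellA fld 2, pvCellA fld 5, pvCellA fld 8],
       [pvCellA fld 7, pvCellA fld 10, pvCellA fld 13]] := by
    simp only [pvSeqs, h4, h3, List.map_cons, List.map_nil,
      List.cons_append, List.nil_append, hc]
    norm_num
  simp only [check_4_win, check_4_win_alt, pvWinCoord, hseqs, pvHas3,
    List.any_cons, List.any_nil, List.zip, List.drop, List.zipWith, pv_cond3,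
    Bool.or_false]
  ac_rfl

-- ===== VERDICT (by name: the statement is the Claim_ definition above) =====
theorem check_4_win_spec : Claim_equal_check_4_win := by
  intro fld _ _
  exact ports_eq fld
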